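-- pv_equiv track=rewrite | github.com/Snijamudheen/Leetcode_Practice | python/mine/count_prefix_occurrences.py | count_prefix_occurrences
-- ===== SOURCE A (Python) =====
-- def count_prefix_occurrences(names, prefixes):
--     # Create a dictionary to store the count of each prefix
--     prefix_count = {}
--
--     # Loop through each prefix in the prefixes list
--     for prefix in prefixes:
--         count = 0  # Initialize the count to 0 for each prefix
--
--         # Loop through each name in the names list
--         for name in names:
--             # Compare each name's starting characters with the prefix
--             # Check if the name's first 'n' characters (where n is the length of the prefix) match the prefix
--             if name[:len(prefix)] == prefix:  # This checks if the name starts with the prefix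
--                 count += 1  # Increase the count if there's a match
--
--         # Save the count for each prefix in the dictionary
--         prefix_count[prefix] = count
--
--     return prefix_count  # Return the final counts for all prefixes
-- ===== SOURCE B (Python) =====
-- def count_prefix_occurrences(names, prefixes):
--     # Build a counter over ALL prefixes of every name once (a flattened trie),
--     # then answer each query by a single dictionary lookup.
--     counter = {}
--     for name in names:
--         for i in range(len(name) + 1):
--             p = name[:i]
--             counter[p] = counter.get(p, 0) + 1
--     result = {}
--     for prefix in prefixes:
--         result[prefix] = counter.get(prefix, 0)
--     return result
-- ===== Notes on version B (the rewrite author's own statement) =====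
-- stated objective: faster
-- what changed: Instead of scanning all names for every prefix, B tabulates every prefix of every name once in a dictionary (a flattened trie) and answers each query with one O(1) lookup.
import Mathlib
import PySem

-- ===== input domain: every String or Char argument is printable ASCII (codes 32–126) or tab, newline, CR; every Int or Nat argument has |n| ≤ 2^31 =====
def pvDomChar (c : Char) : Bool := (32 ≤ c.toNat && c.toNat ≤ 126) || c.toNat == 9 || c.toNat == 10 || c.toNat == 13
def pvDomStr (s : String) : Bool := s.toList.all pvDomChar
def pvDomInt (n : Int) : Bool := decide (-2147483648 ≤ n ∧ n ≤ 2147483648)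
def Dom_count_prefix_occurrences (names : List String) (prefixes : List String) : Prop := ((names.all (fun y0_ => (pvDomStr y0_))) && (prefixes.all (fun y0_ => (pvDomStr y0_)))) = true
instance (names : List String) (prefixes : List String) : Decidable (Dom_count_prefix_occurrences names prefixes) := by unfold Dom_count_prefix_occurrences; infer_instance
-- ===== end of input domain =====

-- B replaces A's prefix-by-prefix scan of all names with a dictionary tabulating every
-- prefix of every name once (a flattened trie), answered by one lookup per query: faster.

-- ===== PORT A =====
def count_prefix_occurrences (names : List String) (prefixes : List String) : List (String × Int) :=
  (prefixes.foldl (fun prefix_count prefix_ =>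
      let count := names.foldl (fun count name =>
          if PySem.Str.slice name none (some (PySem.Str.len prefix_ : Int)) = prefix_
          then count + 1 else count) (0 : Int)
      prefix_count.insert prefix_ count)
    PySem.Dict.empty).items

-- ===== PORT B =====
def count_prefix_occurrences_alt (names : List String) (prefixes : List String) : List (String × Int) :=
  let counter : PySem.Dict String Int := names.foldl (fun counter name =>
      (PySem.List.pyRange 0 ((PySem.Str.len name : Int) + 1) 1).foldl (fun counter i =>
        let p := PySem.Str.slice name none (some i)
        counter.insert p (counter.getD p 0 + 1)) counter)
    PySem.Dict.empty
  (prefixes.foldl (fun result prefix_ => result.insert prefix_ (counter.getD prefix_ 0))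
    PySem.Dict.empty).items

-- ===== PRECONDITION & SPEC =====
def Spec_count_prefix_occurrences (names : List String) (prefixes : List String) (out : List (String × Int)) : Prop := out = count_prefix_occurrences_alt names prefixes
instance (names : List String) (prefixes : List String) (out : List (String × Int)) : Decidable (Spec_count_prefix_occurrences names prefixes out) := by unfold Spec_count_prefix_occurrences; infer_instance

-- ===== CLAIM (what is proved, stated in full; the proofs are below) =====
def Claim_equal_count_prefix_occurrences : Prop := ∀ (names : List String) (prefixes : List String), Dom_count_prefix_occurrences names prefixes → Spec_count_prefix_occurrences names prefixes (count_prefix_occurrences names prefixes)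

-- ===== LEMMAS AND PROOFS =====

-- the list of slices B's inner loop iterates over (all prefixes of name, as strings)
def pvPrefixStrings (name : String) : List String :=
  (PySem.List.pyRange 0 ((PySem.Str.len name : Int) + 1) 1).map
    (fun i => PySem.Str.slice name none (some i))

lemma pvPrefixStrings_eq (name : String) :
    pvPrefixStrings name =
      (List.range (name.toList.length + 1)).map (fun k => String.ofList (name.toList.take k)) := by
  unfold pvPrefixStrings
  rw [PySem.List.pyRange_one]
  simp only [List.map_map]
  apply List.map_congr_left
  intro k hk
  simp only [Function.comp_apply, zero_add]
  rw [← String.toList_inj, PySem.Str.toList_slice]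
  simp [PySem.List.slice_to_natCast]

-- B's inner loop, rewritten as a fold over pvPrefixStrings
lemma pvInner_eq (name : String) (d : PySem.Dict String Int) :
    (PySem.List.pyRange 0 ((PySem.Str.len name : Int) + 1) 1).foldl (fun counter i =>
        let p := PySem.Str.slice name none (some i)
        counter.insert p (counter.getD p 0 + 1)) d
      = (pvPrefixStrings name).foldl (fun c p => c.insert p (c.getD p 0 + 1)) d := by
  unfold pvPrefixStrings
  rw [List.foldl_map]

-- the nested counter build is the flat fold over all prefixes of all names
lemma pvCounter_flat (names : List String) (d : PySem.Dict String Int) :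
    names.foldl (fun counter name =>
        (PySem.List.pyRange 0 ((PySem.Str.len name : Int) + 1) 1).foldl (fun counter i =>
          let p := PySem.Str.slice name none (some i)
          counter.insert p (counter.getD p 0 + 1)) counter) d
      = (names.flatMap pvPrefixStrings).foldl (fun c p => c.insert p (c.getD p 0 + 1)) d := by
  induction names generalizing d with
  | nil => simp
  | cons n ns ih =>
    simp only [List.foldl_cons, List.flatMap_cons, List.foldl_append]
    rw [pvInner_eq, ih]

-- a string occurs in pvPrefixStrings name exactly once iff it passes A's test, else not at all
lemma pvCount_prefixStrings (name p : String) :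
    (pvPrefixStrings name).count p
      = (if PySem.Str.slice name none (some (PySem.Str.len p : Int)) = p then 1 else 0) := by
  rw [pvPrefixStrings_eq]
  have hcond : (PySem.Str.slice name none (some (PySem.Str.len p : Int)) = p)
      ↔ p.toList <+: name.toList := by
    rw [← String.toList_inj, PySem.Str.toList_slice]
    simp only [PySem.Chars.slice_eq_listSlice, PySem.Str.len_eq_length]
    rw [PySem.List.slice_to_natCast, List.prefix_iff_eq_take]
    exact ⟨fun h => h.symm, fun h => h.symm⟩
  have hnd : ((List.range (name.toList.length + 1)).map
      (fun k => String.ofList (name.toList.take k))).Nodup := by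
    refine List.Nodup.map_on ?_ (List.nodup_range)
    intro x hx y hy hxy
    rw [List.mem_range] at hx hy
    have h2 : (name.toList.take x).length = (name.toList.take y).length := by
      rw [← String.toList_inj] at hxy
      simp only [String.toList_ofList] at hxy
      rw [hxy]
    simp only [List.length_take] at h2
    omega
  have hmem : p ∈ (List.range (name.toList.length + 1)).map
      (fun k => String.ofList (name.toList.take k)) ↔ p.toList <+: name.toList := by
    constructor
    · intro h
      obtain ⟨k, hk, hkp⟩ := List.mem_map.mp h
      rw [← String.toList_inj] at hkp
      simp only [String.toList_ofList] at hkp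
      exact hkp ▸ List.take_prefix k name.toList
    · intro h
      refine List.mem_map.mpr ⟨p.toList.length, ?_, ?_⟩
      · rw [List.mem_range]; exact Nat.lt_succ_of_le h.length_le
      · rw [← String.toList_inj]
        simp only [String.toList_ofList]
        exact ((List.prefix_iff_eq_take.mp h).symm)
  by_cases h : p.toList <+: name.toList
  · rw [if_pos (hcond.mpr h)]
    exact List.count_eq_one_of_mem hnd (hmem.mpr h)
  · rw [if_neg (fun hc => h (hcond.mp hc))]
    exact List.count_eq_zero_of_not_mem (fun hm => h (hmem.mp hm))

-- total prefix occurrences across all names, as A counts them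
lemma pvCount_flatMap_nat (names : List String) (p : String) :
    (names.flatMap pvPrefixStrings).count p
      = names.countP (fun name =>
          decide (PySem.Str.slice name none (some (PySem.Str.len p : Int)) = p)) := by
  induction names with
  | nil => simp
  | cons n ns ih =>
    rw [List.flatMap_cons, List.count_append, List.countP_cons, ih, pvCount_prefixStrings]
    simp only [decide_eq_true_eq]
    exact Nat.add_comm _ _

-- A's per-prefix scan equals the flat tabulated count
lemma pvCount_flatMap (names : List String) (p : String) :
    ((names.flatMap pvPrefixStrings).count p : Int)
      = names.foldl (fun count name =>
          if PySem.Str.slice name none (some (PySem.Str.len p : Int)) = p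
          then count + 1 else count) (0 : Int) := by
  have hfold := PySem.List.foldl_count_if
    (fun name => decide (PySem.Str.slice name none (some (PySem.Str.len p : Int)) = p)) names 0
  simp only [decide_eq_true_eq, zero_add] at hfold
  rw [hfold, pvCount_flatMap_nat]

-- ===== VERDICT (by name: the statement is the Claim_ definition above) =====
theorem count_prefix_occurrences_spec : Claim_equal_count_prefix_occurrences := by
  intro names prefixes _
  unfold Spec_count_prefix_occurrences count_prefix_occurrences count_prefix_occurrences_alt
  simp only []
  congr 1
  apply PySem.List.foldl_congr_mem
  intro acc prefix_ _
  rw [pvCounter_flat, PySem.Dict.getD_foldl_insert_add_one, PySem.Dict.getD_empty, zero_add]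
  rw [(pvCount_flatMap names prefix_).symm]
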